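-- pv_equiv track=rewrite | github.com/DooHongKm/Algorithm_Solutions | 프로그래머스/3/132266. 부대복귀/부대복귀.py | solution
-- ===== SOURCE A (Python) =====
-- from collections import deque
--
-- def solution(n, roads, sources, destination):
--
--     result = [0 if i == destination else -1 for i in range(n + 1)]
--     checked = [1 if i == destination else 0 for i in range(n + 1)]
--
--     table = [[] for _ in range(n + 1)]
--     for a, b in roads:
--         table[a].append(b)
--         table[b].append(a)
--
--     q = deque([(destination, 0)])
--     while q:
--         cur, count = q.popleft()
--         for i in table[cur]:
--             if checked[i] == 1:
--                 continue
--             if table[cur] :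
--                 q.append((i, count + 1))
--                 result[i] = count + 1
--                 checked[i] = 1
--
--     return [result[source] for source in sources]
-- ===== SOURCE B (Python) =====
-- def solution(n, roads, sources, destination):
--     dist = [0 if i == destination else -1 for i in range(n + 1)]
--     changed = True
--     while changed:
--         changed = False
--         nxt = dist[:]
--         for a, b in roads:
--             for u, v in ((a, b), (b, a)):
--                 if dist[u] != -1 and nxt[v] == -1:
--                     nxt[v] = dist[u] + 1
--                     changed = True
--         dist = nxt
--     return [dist[s] for s in sources]
-- ===== Notes on version B (the rewrite author's own statement) =====
-- stated objective: alternative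
-- what changed: Replaces A's queue-based BFS over an adjacency table (deque of (node,count) pairs, checked flags) by Bellman-Ford-style rounds of edge relaxation: no adjacency table, no queue and no visited array, just repeated passes over the raw edge list updating a distance array until a pass changes nothing.
-- intended difference: When destination is negative (with roads and sources non-empty), A's init comprehension never marks it, so A returns BFS distances spread from the unseeded wrapped slot n (e.g. [1,2] on the witness); B's relaxation finds no seeded node and returns -1 for every source, the intended 'unreachable' answer for a node id outside 0..n. — e.g. on solution(1, [(0, 1)], [0, 1], -1): A returns [1, 2], B returns [-1, -1]
import Mathlib
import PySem

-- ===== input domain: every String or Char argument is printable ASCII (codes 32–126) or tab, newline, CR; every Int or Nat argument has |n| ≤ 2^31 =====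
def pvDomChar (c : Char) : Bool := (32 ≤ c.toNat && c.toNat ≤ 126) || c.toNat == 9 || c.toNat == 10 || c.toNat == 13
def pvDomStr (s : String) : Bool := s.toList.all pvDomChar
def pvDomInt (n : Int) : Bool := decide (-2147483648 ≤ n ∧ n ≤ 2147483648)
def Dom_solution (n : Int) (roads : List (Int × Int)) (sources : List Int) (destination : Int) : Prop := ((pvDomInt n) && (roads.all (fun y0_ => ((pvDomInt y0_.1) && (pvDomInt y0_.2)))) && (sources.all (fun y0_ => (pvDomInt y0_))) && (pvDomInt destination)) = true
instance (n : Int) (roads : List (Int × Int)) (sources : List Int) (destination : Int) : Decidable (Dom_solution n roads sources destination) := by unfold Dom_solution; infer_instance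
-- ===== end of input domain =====

-- B replaces A's queue-based BFS over an adjacency table by Bellman-Ford-style rounds of
-- relaxation over the raw edge list, repeated until a round changes nothing (alternative, not faster).

-- ===== PORT A =====
-- for a, b in roads: table[a].append(b); table[b].append(a)   (pyGet?/pySet? = Python indexing, none = IndexError)
def pvBuildTable : List (Int × Int) → List (List Int) → Option (List (List Int))
  | [], tbl => some tbl
  | (a, b) :: rest, tbl =>
    match PySem.List.pyGet? tbl a with
    | none => none
    | some la =>
      match PySem.List.pySet? tbl a (la ++ [b]) with
      | none => none
      | some tbl1 =>
        match PySem.List.pyGet? tbl1 b with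
        | none => none
        | some lb =>
          match PySem.List.pySet? tbl1 b (lb ++ [a]) with
          | none => none
          | some tbl2 => pvBuildTable rest tbl2

-- for i in table[cur]: if checked[i] == 1: continue; if table[cur]: q.append((i,count+1)); result[i]=count+1; checked[i]=1
-- g is the (unchanged) list table[cur] that Python's `if table[cur]:` re-tests each iteration
def pvForNbrs (g : List Int) (count : Int) :
    List Int → List Int × List Int × List (Int × Int) → Option (List Int × List Int × List (Int × Int))
  | [], st => some st
  | i :: rest, (res, chk, q) =>
    match PySem.List.pyGet? chk i with
    | none => none
    | some ci =>
      if ci = 1 then pvForNbrs g count rest (res, chk, q)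
      else if g.isEmpty then pvForNbrs g count rest (res, chk, q)
      else
        match PySem.List.pySet? res i (count + 1) with
        | none => none
        | some res' =>
          match PySem.List.pySet? chk i 1 with
          | none => none
          | some chk' => pvForNbrs g count rest (res', chk', q ++ [(i, count + 1)])

-- while q: cur, count = q.popleft(); …   (fuel only makes the loop total; inputs in Pre_ never exhaust it)
def pvRunQ (tbl : List (List Int)) : Nat → List Int → List Int → List (Int × Int) → Option (List Int × List Int)
  | _, res, chk, [] => some (res, chk)
  | 0, _, _, _ :: _ => none
  | fuel + 1, res, chk, (cur, count) :: q =>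
    match PySem.List.pyGet? tbl cur with
    | none => none
    | some nbrs =>
      match pvForNbrs nbrs count nbrs (res, chk, q) with
      | none => none
      | some (res', chk', q') => pvRunQ tbl fuel res' chk' q'

-- return [result[source] for source in sources]
def pvReadout (res : List Int) : List Int → Option (List Int)
  | [] => some []
  | s :: rest =>
    match PySem.List.pyGet? res s with
    | none => none
    | some v =>
      match pvReadout res rest with
      | none => none
      | some out => some (v :: out)

def solution (n : Int) (roads : List (Int × Int)) (sources : List Int) (destination : Int) : List Int :=
  let res0 := (PySem.List.pyRange 0 (n + 1) 1).map (fun i => if i = destination then (0 : Int) else -1)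
  let chk0 := (PySem.List.pyRange 0 (n + 1) 1).map (fun i => if i = destination then (1 : Int) else 0)
  let tbl0 := (PySem.List.pyRange 0 (n + 1) 1).map (fun _ => ([] : List Int))
  match pvBuildTable roads tbl0 with
  | none => []          -- IndexError (excluded by Pre_)
  | some tbl =>
    match pvRunQ tbl ((n + 1).toNat + 1) res0 chk0 [(destination, 0)] with
    | none => []        -- IndexError, or fuel exhaustion which Pre_ inputs never reach
    | some (res, _) => (pvReadout res sources).getD []   -- none = IndexError (excluded by Pre_)

-- ===== PORT B =====
-- if dist[u] != -1 and nxt[v] == -1: nxt[v] = dist[u] + 1; changed = True   (short-circuit `and`)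
def pvRelaxDir (dist : List Int) (u v : Int) (nxt : List Int) (changed : Bool) :
    Option (List Int × Bool) :=
  match PySem.List.pyGet? dist u with
  | none => none
  | some du =>
    if du ≠ -1 then
      match PySem.List.pyGet? nxt v with
      | none => none
      | some nv =>
        if nv = -1 then
          match PySem.List.pySet? nxt v (du + 1) with
          | none => none
          | some nxt' => some (nxt', true)
        else some (nxt, changed)
    else some (nxt, changed)

-- for a, b in roads: for u, v in ((a, b), (b, a)): …
def pvEdges (dist : List Int) : List (Int × Int) → List Int → Bool → Option (List Int × Bool)
  | [], nxt, changed => some (nxt, changed)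
  | (a, b) :: rest, nxt, changed =>
    match pvRelaxDir dist a b nxt changed with
    | none => none
    | some (nxt1, ch1) =>
      match pvRelaxDir dist b a nxt1 ch1 with
      | none => none
      | some (nxt2, ch2) => pvEdges dist rest nxt2 ch2

-- changed = True; while changed: changed = False; nxt = dist[:]; …; dist = nxt
-- (fuel only makes the loop total; inputs in Pre_ never exhaust it)
def pvWhile (roads : List (Int × Int)) : Nat → List Int → Option (List Int)
  | 0, _ => none
  | fuel + 1, dist =>
    match pvEdges dist roads dist false with
    | none => none
    | some (nxt, changed) => if changed then pvWhile roads fuel nxt else some nxt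

-- return [dist[s] for s in sources]
def pvReadoutB (res : List Int) : List Int → Option (List Int)
  | [] => some []
  | s :: rest =>
    match PySem.List.pyGet? res s with
    | none => none
    | some v =>
      match pvReadoutB res rest with
      | none => none
      | some out => some (v :: out)

def solution_alt (n : Int) (roads : List (Int × Int)) (sources : List Int) (destination : Int) : List Int :=
  let dist0 := (PySem.List.pyRange 0 (n + 1) 1).map (fun i => if i = destination then (0 : Int) else -1)
  match pvWhile roads ((n + 1).toNat + 2) dist0 with
  | none => []          -- IndexError, or fuel exhaustion which Pre_ inputs never reach
  | some dist => (pvReadoutB dist sources).getD []   -- none = IndexError (excluded by Pre_)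

-- ===== PRECONDITION & SPEC =====
-- Pre_ is exactly the set of inputs on which Python's A returns normally: A raises IndexError iff
-- n < 0 or some of destination, a road endpoint or a source lies outside [-(n+1), n] (Python's
-- negative in-range indices wrap; both programs index the same way).
def Pre_solution (n : Int) (roads : List (Int × Int)) (sources : List Int) (destination : Int) : Prop :=
  0 ≤ n ∧ (-(n + 1) ≤ destination ∧ destination ≤ n) ∧
  (∀ p ∈ roads, (-(n + 1) ≤ p.1 ∧ p.1 ≤ n) ∧ (-(n + 1) ≤ p.2 ∧ p.2 ≤ n)) ∧
  (∀ s ∈ sources, -(n + 1) ≤ s ∧ s ≤ n)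
instance (n : Int) (roads : List (Int × Int)) (sources : List Int) (destination : Int) : Decidable (Pre_solution n roads sources destination) := by unfold Pre_solution; infer_instance

def pvWitness_solution : Int × (List (Int × Int)) × List Int × Int := (2, [(0, 1), (1, 2)], [0, 1], 2)

-- When destination is negative (with roads and sources non-empty), A's init comprehension never marks
-- it, so A returns BFS distances spread from the unseeded wrapped slot n; B's relaxation finds no
-- seeded node and returns -1 for every source, the intended 'unreachable' answer for such an id.
def D_solution (n : Int) (roads : List (Int × Int)) (sources : List Int) (destination : Int) : Prop :=
  destination < 0 ∧ roads ≠ [] ∧ sources ≠ []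
instance (n : Int) (roads : List (Int × Int)) (sources : List Int) (destination : Int) : Decidable (D_solution n roads sources destination) := by unfold D_solution; infer_instance

def Spec_solution (n : Int) (roads : List (Int × Int)) (sources : List Int) (destination : Int) (out : List Int) : Prop := ¬ D_solution n roads sources destination → out = solution_alt n roads sources destination
instance (n : Int) (roads : List (Int × Int)) (sources : List Int) (destination : Int) (out : List Int) : Decidable (Spec_solution n roads sources destination out) := by unfold Spec_solution; infer_instance

def pvDiffWitness_solution : Int × (List (Int × Int)) × List Int × Int := (1, [(0, 1)], [0, 1], -1)
def pvDiffWitnessOut_solution : (List Int) × (List Int) := ([1, 2], [-1, -1])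

-- ===== CLAIM (what is proved, stated in full; the proofs are below) =====
def Claim_unchanged_solution : Prop := ∀ (n : Int) (roads : List (Int × Int)) (sources : List Int) (destination : Int), Dom_solution n roads sources destination → Pre_solution n roads sources destination → Spec_solution n roads sources destination (solution n roads sources destination)
def Claim_changed_solution : Prop := Dom_solution (pvDiffWitness_solution.1) (pvDiffWitness_solution.2.1) (pvDiffWitness_solution.2.2.1) (pvDiffWitness_solution.2.2.2) ∧ Pre_solution (pvDiffWitness_solution.1) (pvDiffWitness_solution.2.1) (pvDiffWitness_solution.2.2.1) (pvDiffWitness_solution.2.2.2) ∧ D_solution (pvDiffWitness_solution.1) (pvDiffWitness_solution.2.1) (pvDiffWitness_solution.2.2.1) (pvDiffWitness_solution.2.2.2) ∧ solution (pvDiffWitness_solution.1) (pvDiffWitness_solution.2.1) (pvDiffWitness_solution.2.2.1) (pvDiffWitness_solution.2.2.2) = pvDiffWitnessOut_solution.1 ∧ solution_alt (pvDiffWitness_solution.1) (pvDiffWitness_solution.2.1) (pvDiffWitness_solution.2.2.1) (pvDiffWitness_solution.2.2.2) = pvDiffWitnessOut_solution.2 ∧ pvDiffWitnessOut_solution.1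 ≠ pvDiffWitnessOut_solution.2

-- ===== LEMMAS AND PROOFS =====

-- Python's normalised index for i with -len ≤ i < len
def pvIdx (L : Nat) (i : Int) : Nat := if 0 ≤ i then i.toNat else L - (-i).toNat

-- number of not-yet-visited slots: the loops' termination measure
def pvZeros (chk : List Int) : Nat := chk.countP (fun x => decide (x ≠ 1))

-- index-level adjacency of the road list
def pvAdjP (roads : List (Int × Int)) (L : Nat) (i j : Nat) : Prop :=
  ∃ p ∈ roads, (pvIdx L p.1 = i ∧ pvIdx L p.2 = j) ∨ (pvIdx L p.2 = i ∧ pvIdx L p.1 = j)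

-- slot j is a table-neighbour of some frontier node
def pvAdjFP (tbl : List (List Int)) (L : Nat) (F : List Int) (j : Nat) : Prop :=
  ∃ u ∈ F, ∃ v ∈ tbl.getD (pvIdx L u) [], pvIdx L v = j

-- slot j is an edge-neighbour of some already-valued slot of dist
def pvVisP (dist : List Int) (L : Nat) (es : List (Int × Int)) (j : Nat) : Prop :=
  ∃ p ∈ es, (pvIdx L p.2 = j ∧ dist.getD (pvIdx L p.1) 0 ≠ -1) ∨
            (pvIdx L p.1 = j ∧ dist.getD (pvIdx L p.2) 0 ≠ -1)

lemma pvIdx_lt (L : Nat) (i : Int) (h0 : -(L : Int) ≤ i) (h1 : i < L) : pvIdx L i < L := by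
  unfold pvIdx
  split_ifs <;> omega

lemma pvIdx?_eq (L : Nat) (i : Int) (h0 : -(L : Int) ≤ i) (h1 : i < L) :
    PySem.List.pyIdx? L i = some (pvIdx L i) := by
  unfold PySem.List.pyIdx? pvIdx
  split_ifs <;> first | rfl | omega

lemma pvGet?_eq {α : Type} (xs : List α) (i : Int)
    (h0 : -(xs.length : Int) ≤ i) (h1 : i < xs.length) :
    PySem.List.pyGet? xs i = xs[pvIdx xs.length i]? := by
  simp [PySem.List.pyGet?, pvIdx?_eq xs.length i h0 h1]

lemma pvGetD_lt {α : Type} (xs : List α) (j : Nat) (d : α) (h : j < xs.length) :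
    xs.getD j d = xs[j] := by
  simp [List.getD, List.getElem?_eq_getElem h]

lemma pvLookup {α : Type} (xs : List α) (d : α) (i : Int)
    (h0 : -(xs.length : Int) ≤ i) (h1 : i < xs.length) :
    PySem.List.pyGet? xs i = some (xs.getD (pvIdx xs.length i) d) := by
  have hlt := pvIdx_lt xs.length i h0 h1
  rw [pvGet?_eq xs i h0 h1, List.getElem?_eq_getElem hlt, pvGetD_lt xs _ d hlt]

lemma pvSetSome {α : Type} (xs : List α) (v : α) (i : Int)
    (h0 : -(xs.length : Int) ≤ i) (h1 : i < xs.length) :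
    PySem.List.pySet? xs i v = some (xs.set (pvIdx xs.length i) v) := by
  simp [PySem.List.pySet?, pvIdx?_eq xs.length i h0 h1]

lemma pvGetD_set {α : Type} (xs : List α) (k j : Nat) (v d : α) (hk : k < xs.length) :
    (xs.set k v).getD j d = if j = k then v else xs.getD j d := by
  by_cases h : j = k
  · subst h
    simp [List.getD, List.getElem?_set_self, hk]
  · simp [List.getD, List.getElem?_set_ne (by omega : k ≠ j), h]

lemma pvGetD_mem {α : Type} (xs : List α) (i : Nat) (d : α) (h : i < xs.length) :
    xs.getD i d ∈ xs := by
  rw [pvGetD_lt xs i d h]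
  exact List.getElem_mem h

lemma pvZerosSet (chk : List Int) (i : Int)
    (h0 : -(chk.length : Int) ≤ i) (h1 : i < chk.length)
    (hv : chk.getD (pvIdx chk.length i) 0 ≠ 1) :
    pvZeros (chk.set (pvIdx chk.length i) 1) + 1 = pvZeros chk := by
  have hlt := pvIdx_lt chk.length i h0 h1
  rw [pvGetD_lt chk _ 0 hlt] at hv
  have hc : 0 < chk.countP (fun x => decide (x ≠ 1)) :=
    List.countP_pos_iff.2 ⟨chk[pvIdx chk.length i], List.getElem_mem hlt, by simp [hv]⟩
  unfold pvZeros
  rw [List.countP_set hlt, if_pos (by simp [hv]), if_neg (by simp)]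
  omega

-- the two readouts are the same loop
lemma pvReadoutSame (res : List Int) : ∀ sources : List Int,
    pvReadoutB res sources = pvReadout res sources := by
  intro sources
  induction sources with
  | nil => rfl
  | cons s rest ih =>
    simp only [pvReadout, pvReadoutB, ih]

-- building the table succeeds on Pre_ inputs and keeps every entry an in-range node id
lemma pvBuild (n : Int) (hn : 0 ≤ n) :
    ∀ (roads : List (Int × Int)) (tbl : List (List Int)),
    tbl.length = (n + 1).toNat →
    (∀ l ∈ tbl, ∀ v ∈ l, -(n + 1) ≤ v ∧ v ≤ n) →
    (∀ p ∈ roads, (-(n + 1) ≤ p.1 ∧ p.1 ≤ n) ∧ (-(n + 1) ≤ p.2 ∧ p.2 ≤ n)) →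
    ∃ tbl', pvBuildTable roads tbl = some tbl' ∧
      tbl'.length = (n + 1).toNat ∧
      (∀ l ∈ tbl', ∀ v ∈ l, -(n + 1) ≤ v ∧ v ≤ n) := by
  intro roads
  induction roads with
  | nil =>
    intro tbl h1 h2 _
    exact ⟨tbl, rfl, h1, h2⟩
  | cons p rest ih =>
    obtain ⟨a, b⟩ := p
    intro tbl h1 h2 hro
    obtain ⟨⟨ha0, ha1⟩, hb0, hb1⟩ := hro (a, b) (List.mem_cons_self)
    have hrest : ∀ p ∈ rest, (-(n + 1) ≤ p.1 ∧ p.1 ≤ n) ∧ (-(n + 1) ≤ p.2 ∧ p.2 ≤ n) :=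
      fun p hp => hro p (List.mem_cons_of_mem _ hp)
    have hget1 : PySem.List.pyGet? tbl a = some (tbl.getD (pvIdx tbl.length a) []) :=
      pvLookup tbl [] a (by omega) (by omega)
    have hset1 : PySem.List.pySet? tbl a (tbl.getD (pvIdx tbl.length a) [] ++ [b])
        = some (tbl.set (pvIdx tbl.length a) (tbl.getD (pvIdx tbl.length a) [] ++ [b])) :=
      pvSetSome tbl _ a (by omega) (by omega)
    have hmema : tbl.getD (pvIdx tbl.length a) [] ∈ tbl :=
      pvGetD_mem tbl _ [] (pvIdx_lt tbl.length a (by omega) (by omega))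
    have h1' : (tbl.set (pvIdx tbl.length a) (tbl.getD (pvIdx tbl.length a) [] ++ [b])).length
        = (n + 1).toNat := by simpa using h1
    have h2' : ∀ l ∈ tbl.set (pvIdx tbl.length a) (tbl.getD (pvIdx tbl.length a) [] ++ [b]),
        ∀ v ∈ l, -(n + 1) ≤ v ∧ v ≤ n := by
      intro l hl v hv
      rcases List.mem_or_eq_of_mem_set hl with h | h
      · exact h2 l h v hv
      · subst h
        rcases List.mem_append.1 hv with h | h
        · exact h2 _ hmema v h
        · simp only [List.mem_singleton] at h
          subst h; exact ⟨hb0, hb1⟩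
    set tbl1 := tbl.set (pvIdx tbl.length a) (tbl.getD (pvIdx tbl.length a) [] ++ [b]) with htbl1
    have hget2 : PySem.List.pyGet? tbl1 b = some (tbl1.getD (pvIdx tbl1.length b) []) :=
      pvLookup tbl1 [] b (by omega) (by omega)
    have hset2 : PySem.List.pySet? tbl1 b (tbl1.getD (pvIdx tbl1.length b) [] ++ [a])
        = some (tbl1.set (pvIdx tbl1.length b) (tbl1.getD (pvIdx tbl1.length b) [] ++ [a])) :=
      pvSetSome tbl1 _ b (by omega) (by omega)
    have hmemb : tbl1.getD (pvIdx tbl1.length b) [] ∈ tbl1 :=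
      pvGetD_mem tbl1 _ [] (pvIdx_lt tbl1.length b (by omega) (by omega))
    have h2'' : ∀ l ∈ tbl1.set (pvIdx tbl1.length b) (tbl1.getD (pvIdx tbl1.length b) [] ++ [a]),
        ∀ v ∈ l, -(n + 1) ≤ v ∧ v ≤ n := by
      intro l hl v hv
      rcases List.mem_or_eq_of_mem_set hl with h | h
      · exact h2' l h v hv
      · subst h
        rcases List.mem_append.1 hv with h | h
        · exact h2' _ hmemb v h
        · simp only [List.mem_singleton] at h
          subst h; exact ⟨ha0, ha1⟩
    obtain ⟨tbl', hbuild, hl', he'⟩ :=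
      ih (tbl1.set (pvIdx tbl1.length b) (tbl1.getD (pvIdx tbl1.length b) [] ++ [a]))
        (by simpa using h1') h2'' hrest
    refine ⟨tbl', ?_, hl', he'⟩
    simp only [pvBuildTable, hget1, hset1, ← htbl1, hget2, hset2]
    exact hbuild

-- membership-level characterisation of the built adjacency table
lemma pvTblChar (L : Nat) :
    ∀ (roads0 : List (Int × Int)) (tbl tbl' : List (List Int)),
    pvBuildTable roads0 tbl = some tbl' → tbl.length = L →
    (∀ p ∈ roads0, (-(L : Int) ≤ p.1 ∧ p.1 < L) ∧ (-(L : Int) ≤ p.2 ∧ p.2 < L)) →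
    ∀ i, i < L → ∀ j,
      ((∃ v ∈ tbl'.getD i [], pvIdx L v = j) ↔
       (∃ v ∈ tbl.getD i [], pvIdx L v = j) ∨ pvAdjP roads0 L i j) := by
  intro roads0
  induction roads0 with
  | nil =>
    intro tbl tbl' hb hlen _ i hi j
    simp only [pvBuildTable, Option.some.injEq] at hb
    subst hb
    simp [pvAdjP]
  | cons p rest ih =>
    obtain ⟨a, b⟩ := p
    intro tbl tbl' hb hlen hval i hi j
    obtain ⟨⟨ha0, ha1⟩, hb0, hb1⟩ := hval (a, b) (List.mem_cons_self)
    have hrest : ∀ p ∈ rest, (-(L : Int) ≤ p.1 ∧ p.1 < L) ∧ (-(L : Int) ≤ p.2 ∧ p.2 < L) :=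
      fun p hp => hval p (List.mem_cons_of_mem _ hp)
    have hia : pvIdx L a < L := pvIdx_lt L a ha0 ha1
    have hib : pvIdx L b < L := pvIdx_lt L b hb0 hb1
    have hget1 : PySem.List.pyGet? tbl a = some (tbl.getD (pvIdx tbl.length a) []) :=
      pvLookup tbl [] a (by omega) (by omega)
    have hset1 : PySem.List.pySet? tbl a (tbl.getD (pvIdx tbl.length a) [] ++ [b])
        = some (tbl.set (pvIdx tbl.length a) (tbl.getD (pvIdx tbl.length a) [] ++ [b])) :=
      pvSetSome tbl _ a (by omega) (by omega)
    set tbl1 := tbl.set (pvIdx tbl.length a) (tbl.getD (pvIdx tbl.length a) [] ++ [b]) with htbl1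
    have hlen1 : tbl1.length = L := by simp [htbl1, hlen]
    have hget2 : PySem.List.pyGet? tbl1 b = some (tbl1.getD (pvIdx tbl1.length b) []) :=
      pvLookup tbl1 [] b (by omega) (by omega)
    have hset2 : PySem.List.pySet? tbl1 b (tbl1.getD (pvIdx tbl1.length b) [] ++ [a])
        = some (tbl1.set (pvIdx tbl1.length b) (tbl1.getD (pvIdx tbl1.length b) [] ++ [a])) :=
      pvSetSome tbl1 _ b (by omega) (by omega)
    set tbl2 := tbl1.set (pvIdx tbl1.length b) (tbl1.getD (pvIdx tbl1.length b) [] ++ [a]) with htbl2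
    have hlen2 : tbl2.length = L := by simp [htbl2, hlen1]
    have hb' : pvBuildTable rest tbl2 = some tbl' := by
      rw [← hb]
      simp only [pvBuildTable, hget1, hset1, ← htbl1, hget2, hset2, ← htbl2]
    have hkey := ih tbl2 tbl' hb' hlen2 hrest i hi j
    rw [hkey]
    have h1mem : ∀ k, k < L → ∀ x,
        (x ∈ tbl1.getD k [] ↔ x ∈ tbl.getD k [] ∨ (k = pvIdx L a ∧ x = b)) := by
      intro k hk x
      rw [htbl1, hlen]
      rw [pvGetD_set tbl (pvIdx L a) k _ [] (by omega)]
      by_cases h : k = pvIdx L a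
      · subst h; simp [List.mem_append, or_comm]
      · simp [h]
    have h2mem : ∀ k, k < L → ∀ x,
        (x ∈ tbl2.getD k [] ↔ x ∈ tbl1.getD k [] ∨ (k = pvIdx L b ∧ x = a)) := by
      intro k hk x
      rw [htbl2, hlen1]
      rw [pvGetD_set tbl1 (pvIdx L b) k _ [] (by omega)]
      by_cases h : k = pvIdx L b
      · subst h; simp [List.mem_append, or_comm]
      · simp [h]
    have hmem : (∃ v ∈ tbl2.getD i [], pvIdx L v = j) ↔
        ((∃ v ∈ tbl.getD i [], pvIdx L v = j) ∨
         (i = pvIdx L a ∧ pvIdx L b = j) ∨ (i = pvIdx L b ∧ pvIdx L a = j)) := by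
      constructor
      · rintro ⟨v, hv, rfl⟩
        rcases (h2mem i hi v).1 hv with hv1 | ⟨hib', rfl⟩
        · rcases (h1mem i hi v).1 hv1 with hv0 | ⟨hia', rfl⟩
          · exact Or.inl ⟨v, hv0, rfl⟩
          · exact Or.inr (Or.inl ⟨hia', rfl⟩)
        · exact Or.inr (Or.inr ⟨hib', rfl⟩)
      · rintro (⟨v, hv, rfl⟩ | ⟨rfl, rfl⟩ | ⟨rfl, rfl⟩)
        · exact ⟨v, (h2mem i hi v).2 (Or.inl ((h1mem i hi v).2 (Or.inl hv))), rfl⟩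
        · exact ⟨b, (h2mem _ hi b).2 (Or.inl ((h1mem _ hi b).2 (Or.inr ⟨rfl, rfl⟩))), rfl⟩
        · exact ⟨a, (h2mem _ hi a).2 (Or.inr ⟨rfl, rfl⟩), rfl⟩
    have hadj : pvAdjP ((a, b) :: rest) L i j ↔
        ((i = pvIdx L a ∧ pvIdx L b = j) ∨ (i = pvIdx L b ∧ pvIdx L a = j)) ∨
        pvAdjP rest L i j := by
      unfold pvAdjP
      simp only [List.mem_cons]
      constructor
      · rintro ⟨p, hp | hp, hdir⟩
        · subst hp
          rcases hdir with ⟨h1, h2⟩ | ⟨h1, h2⟩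
          · exact Or.inl (Or.inl ⟨h1.symm, h2⟩)
          · exact Or.inl (Or.inr ⟨h1.symm, h2⟩)
        · exact Or.inr ⟨p, hp, hdir⟩
      · rintro ((⟨h1, h2⟩ | ⟨h1, h2⟩) | ⟨p, hp, hdir⟩)
        · exact ⟨(a, b), Or.inl rfl, Or.inl ⟨h1.symm, h2⟩⟩
        · exact ⟨(a, b), Or.inl rfl, Or.inr ⟨h1.symm, h2⟩⟩
        · exact ⟨p, Or.inr hp, hdir⟩
    rw [hmem, hadj, or_assoc]

-- one neighbour scan of A: slot-level characterisation of the updated arrays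
lemma pvForNbrsChar (L : Nat) (g : List Int) (hg : g.isEmpty = false) (c : Int) :
    ∀ (nbrs res chk : List Int) (q : List (Int × Int)),
    res.length = L → chk.length = L → (∀ v ∈ nbrs, -(L : Int) ≤ v ∧ v < L) →
    ∃ (res' chk' new : List Int),
      pvForNbrs g c nbrs (res, chk, q) = some (res', chk', q ++ new.map (fun v => (v, c + 1))) ∧
      res'.length = L ∧ chk'.length = L ∧
      (∀ j, j < L →
        ((chk.getD j 0 ≠ 1 ∧ ∃ v ∈ nbrs, pvIdx L v = j) →
          chk'.getD j 0 = 1 ∧ res'.getD j 0 = c + 1) ∧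
        (¬(chk.getD j 0 ≠ 1 ∧ ∃ v ∈ nbrs, pvIdx L v = j) →
          chk'.getD j 0 = chk.getD j 0 ∧ res'.getD j 0 = res.getD j 0)) ∧
      (∀ w ∈ new, -(L : Int) ≤ w ∧ w < L) ∧
      (∀ j, j < L → ((∃ w ∈ new, pvIdx L w = j) ↔
        (chk.getD j 0 ≠ 1 ∧ ∃ v ∈ nbrs, pvIdx L v = j))) ∧
      pvZeros chk' + new.length = pvZeros chk := by
  intro nbrs
  induction nbrs with
  | nil =>
    intro res chk q hr hc hv
    refine ⟨res, chk, [], by rw [List.map_nil, List.append_nil]; rfl, hr, hc, ?_, by simp, ?_, by simp⟩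
    · intro j hj
      constructor
      · rintro ⟨_, v, hv, _⟩
        exact absurd hv (List.not_mem_nil)
      · intro _; exact ⟨rfl, rfl⟩
    · intro j hj
      simp
  | cons v rest ih =>
    intro res chk q hr hc hval
    obtain ⟨hv0, hv1⟩ := hval v (List.mem_cons_self)
    have hrest : ∀ u ∈ rest, -(L : Int) ≤ u ∧ u < L := fun u hu => hval u (List.mem_cons_of_mem _ hu)
    have hjv : pvIdx L v < L := pvIdx_lt L v hv0 hv1
    have hgetc : PySem.List.pyGet? chk v = some (chk.getD (pvIdx chk.length v) 0) :=
      pvLookup chk 0 v (by omega) (by omega)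
    rw [hc] at hgetc
    by_cases hc1 : chk.getD (pvIdx L v) 0 = 1
    · obtain ⟨res', chk', new, hrun, hr', hc', hforms, hvalnew, himg, hz⟩ :=
        ih res chk q hr hc hrest
      refine ⟨res', chk', new, ?_, hr', hc', ?_, hvalnew, ?_, hz⟩
      · simp only [pvForNbrs, hgetc]
        rw [if_pos hc1]
        exact hrun
      · intro j hj
        have h := hforms j hj
        by_cases hjeq : j = pvIdx L v
        · subst hjeq
          constructor
          · rintro ⟨hne, _⟩; exact absurd hc1 hne
          · intro _
            exact h.2 (by rintro ⟨hne, _⟩; exact hne hc1)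
        · constructor
          · rintro ⟨hne, w, hw, hww⟩
            rcases List.mem_cons.1 hw with rfl | hw'
            · exact absurd hww.symm hjeq
            · exact h.1 ⟨hne, w, hw', hww⟩
          · intro hn
            refine h.2 ?_
            rintro ⟨hne, w, hw', hww⟩
            exact hn ⟨hne, w, List.mem_cons_of_mem _ hw', hww⟩
      · intro j hj
        rw [himg j hj]
        by_cases hjeq : j = pvIdx L v
        · subst hjeq
          constructor
          · rintro ⟨hne, w, hw, hww⟩
            exact ⟨hne, w, List.mem_cons_of_mem _ hw, hww⟩
          · rintro ⟨hne, _⟩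
            exact absurd hc1 hne
        · constructor
          · rintro ⟨hne, w, hw, hww⟩
            exact ⟨hne, w, List.mem_cons_of_mem _ hw, hww⟩
          · rintro ⟨hne, w, hw, hww⟩
            rcases List.mem_cons.1 hw with rfl | hw'
            · exact absurd hww.symm hjeq
            · exact ⟨hne, w, hw', hww⟩
    · -- fresh slot: write res[jv] := c+1, chk[jv] := 1
      have hsetr : PySem.List.pySet? res v (c + 1)
          = some (res.set (pvIdx res.length v) (c + 1)) :=
        pvSetSome res _ v (by omega) (by omega)
      have hsetc : PySem.List.pySet? chk v 1 = some (chk.set (pvIdx chk.length v) 1) :=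
        pvSetSome chk 1 v (by omega) (by omega)
      have hr1 : (res.set (pvIdx res.length v) (c + 1)).length = L := by simpa using hr
      have hc1l : (chk.set (pvIdx chk.length v) 1).length = L := by simpa using hc
      obtain ⟨res', chk', new, hrun, hr', hc', hforms, hvalnew, himg, hz⟩ :=
        ih (res.set (pvIdx res.length v) (c + 1)) (chk.set (pvIdx chk.length v) 1)
          (q ++ [(v, c + 1)]) hr1 hc1l hrest
      have hchk1 : ∀ j, j < L → (chk.set (pvIdx chk.length v) 1).getD j 0
          = if j = pvIdx L v then 1 else chk.getD j 0 := by
        intro j hj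
        rw [hc, pvGetD_set chk (pvIdx L v) j 1 0 (by omega)]
      have hres1 : ∀ j, j < L → (res.set (pvIdx res.length v) (c + 1)).getD j 0
          = if j = pvIdx L v then c + 1 else res.getD j 0 := by
        intro j hj
        rw [hr, pvGetD_set res (pvIdx L v) j (c + 1) 0 (by omega)]
      have hzstep : pvZeros (chk.set (pvIdx chk.length v) 1) + 1 = pvZeros chk := by
        apply pvZerosSet chk v (by omega) (by omega)
        rw [hc]; exact hc1
      refine ⟨res', chk', v :: new, ?_, hr', hc', ?_, ?_, ?_, ?_⟩
      · simp only [pvForNbrs, hgetc]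
        rw [if_neg hc1, if_neg (by simp [hg])]
        simp only [hsetr, hsetc]
        rw [hrun]
        simp [List.append_assoc]
      · intro j hj
        have h := hforms j hj
        have hch := hchk1 j hj
        have hre := hres1 j hj
        by_cases hjeq : j = pvIdx L v
        · subst hjeq
          rw [if_pos rfl] at hch hre
          have hneg : ¬((chk.set (pvIdx chk.length v) 1).getD (pvIdx L v) 0 ≠ 1 ∧
              ∃ w ∈ rest, pvIdx L w = pvIdx L v) := by
            rintro ⟨hne, _⟩; exact hne hch
          obtain ⟨hcf, hrf⟩ := h.2 hneg
          constructor
          · intro _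
            exact ⟨by rw [hcf, hch], by rw [hrf, hre]⟩
          · rintro hn
            exact absurd ⟨hc1, v, List.mem_cons_self, rfl⟩ hn
        · rw [if_neg hjeq] at hch hre
          constructor
          · rintro ⟨hne, w, hw, hww⟩
            rcases List.mem_cons.1 hw with rfl | hw'
            · exact absurd hww.symm hjeq
            · have := h.1 ⟨by rw [hch]; exact hne, w, hw', hww⟩
              exact ⟨this.1, this.2⟩
          · intro hn
            have hn' : ¬((chk.set (pvIdx chk.length v) 1).getD j 0 ≠ 1 ∧
                ∃ w ∈ rest, pvIdx L w = j) := by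
              rintro ⟨hne, w, hw', hww⟩
              exact hn ⟨by rw [hch] at hne; exact hne, w, List.mem_cons_of_mem _ hw', hww⟩
            obtain ⟨hcf, hrf⟩ := h.2 hn'
            exact ⟨by rw [hcf, hch], by rw [hrf, hre]⟩
      · intro w hw
        rcases List.mem_cons.1 hw with rfl | hw'
        · exact ⟨hv0, hv1⟩
        · exact hvalnew w hw'
      · intro j hj
        have him := himg j hj
        have hch := hchk1 j hj
        by_cases hjeq : j = pvIdx L v
        · subst hjeq
          constructor
          · intro _
            exact ⟨hc1, v, List.mem_cons_self, rfl⟩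
          · intro _
            exact ⟨v, List.mem_cons_self, rfl⟩
        · rw [if_neg hjeq] at hch
          constructor
          · rintro ⟨w, hw, hww⟩
            rcases List.mem_cons.1 hw with rfl | hw'
            · exact absurd hww.symm hjeq
            · obtain ⟨hne, x, hx, hxx⟩ := him.1 ⟨w, hw', hww⟩
              rw [hch] at hne
              exact ⟨hne, x, List.mem_cons_of_mem _ hx, hxx⟩
          · rintro ⟨hne, x, hx, hxx⟩
            rcases List.mem_cons.1 hx with rfl | hx'
            · exact absurd hxx.symm hjeq
            · obtain ⟨w, hw, hww⟩ := him.2 ⟨by rw [hch]; exact hne, x, hx', hxx⟩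
              exact ⟨w, List.mem_cons_of_mem _ hw, hww⟩
      · simp only [List.length_cons]
        omega

-- one whole BFS level of A: slot-level characterisation
lemma pvQLevelChar (L : Nat) (tbl : List (List Int)) (htlen : tbl.length = L)
    (htent : ∀ l ∈ tbl, ∀ v ∈ l, -(L : Int) ≤ v ∧ v < L) (c : Int) :
    ∀ (xs res chk : List Int) (ys : List Int) (f : Nat),
    res.length = L → chk.length = L → (∀ u ∈ xs, -(L : Int) ≤ u ∧ u < L) →
    ∃ (res' chk' new : List Int),
      pvRunQ tbl (f + xs.length) res chk
          (xs.map (fun u => (u, c)) ++ ys.map (fun u => (u, c + 1)))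
        = pvRunQ tbl f res' chk' ((ys ++ new).map (fun u => (u, c + 1))) ∧
      res'.length = L ∧ chk'.length = L ∧
      (∀ j, j < L →
        ((chk.getD j 0 ≠ 1 ∧ pvAdjFP tbl L xs j) →
          chk'.getD j 0 = 1 ∧ res'.getD j 0 = c + 1) ∧
        (¬(chk.getD j 0 ≠ 1 ∧ pvAdjFP tbl L xs j) →
          chk'.getD j 0 = chk.getD j 0 ∧ res'.getD j 0 = res.getD j 0)) ∧
      (∀ w ∈ new, -(L : Int) ≤ w ∧ w < L) ∧
      (∀ j, j < L → ((∃ w ∈ new, pvIdx L w = j) ↔ (chk.getD j 0 ≠ 1 ∧ pvAdjFP tbl L xs j))) ∧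
      pvZeros chk' + new.length = pvZeros chk := by
  intro xs
  induction xs with
  | nil =>
    intro res chk ys f hr hc _
    refine ⟨res, chk, [], by simp, hr, hc, ?_, by simp, ?_, by simp⟩
    · intro j hj
      constructor
      · rintro ⟨_, u, hu, _⟩
        exact absurd hu (List.not_mem_nil)
      · intro _; exact ⟨rfl, rfl⟩
    · intro j hj
      simp [pvAdjFP]
  | cons x rest ih =>
    intro res chk ys f hr hc hxs
    obtain ⟨hx0, hx1⟩ := hxs x (List.mem_cons_self)
    have hrest : ∀ u ∈ rest, -(L : Int) ≤ u ∧ u < L := fun u hu => hxs u (List.mem_cons_of_mem _ hu)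
    have hix : pvIdx L x < L := pvIdx_lt L x hx0 hx1
    have htget : PySem.List.pyGet? tbl x = some (tbl.getD (pvIdx tbl.length x) []) :=
      pvLookup tbl [] x (by omega) (by omega)
    rw [htlen] at htget
    have hmem : tbl.getD (pvIdx L x) [] ∈ tbl := pvGetD_mem tbl _ [] (by omega)
    have hnin : ∀ v ∈ tbl.getD (pvIdx L x) [], -(L : Int) ≤ v ∧ v < L := htent _ hmem
    have hfe : f + (x :: rest).length = (f + rest.length) + 1 := by
      simp only [List.length_cons]; omega
    have hAdjCons : ∀ j, pvAdjFP tbl L (x :: rest) j ↔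
        ((∃ v ∈ tbl.getD (pvIdx L x) [], pvIdx L v = j) ∨ pvAdjFP tbl L rest j) := by
      intro j
      unfold pvAdjFP
      simp only [List.mem_cons]
      constructor
      · rintro ⟨u, rfl | hu, hv⟩
        · exact Or.inl hv
        · exact Or.inr ⟨u, hu, hv⟩
      · rintro (hv | ⟨u, hu, hv⟩)
        · exact ⟨x, Or.inl rfl, hv⟩
        · exact ⟨u, Or.inr hu, hv⟩
    rcases hne : tbl.getD (pvIdx L x) [] with _ | ⟨w0, ws⟩
    · -- no neighbours: nothing happens for x
      obtain ⟨res', chk', new, hrun, hr', hc', hforms, hvn, himg, hz⟩ :=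
        ih res chk ys f hr hc hrest
      refine ⟨res', chk', new, ?_, hr', hc', ?_, hvn, ?_, hz⟩
      · rw [hfe]
        simp only [List.map_cons, List.cons_append, pvRunQ, htget, hne, pvForNbrs]
        exact hrun
      · intro j hj
        have h := hforms j hj
        constructor
        · rintro ⟨hnee, hadj⟩
          rcases (hAdjCons j).1 hadj with hv | hadj'
          · rw [hne] at hv
            obtain ⟨v, hv, _⟩ := hv
            exact absurd hv (List.not_mem_nil)
          · exact h.1 ⟨hnee, hadj'⟩
        · intro hn
          refine h.2 ?_
          rintro ⟨hnee, hadj'⟩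
          exact hn ⟨hnee, (hAdjCons j).2 (Or.inr hadj')⟩
      · intro j hj
        rw [himg j hj, hAdjCons j, hne]
        simp
    · have hgne : (tbl.getD (pvIdx L x) []).isEmpty = false := by rw [hne]; rfl
      obtain ⟨res1, chk1, new1, hrun1, hr1, hc1l, hforms1, hvn1, himg1, hz1⟩ :=
        pvForNbrsChar L (tbl.getD (pvIdx L x) []) hgne c (tbl.getD (pvIdx L x) []) res chk
          (rest.map (fun u => (u, c)) ++ ys.map (fun u => (u, c + 1))) hr hc hnin
      obtain ⟨res', chk', new2, hrun2, hr', hc', hforms2, hvn2, himg2, hz2⟩ :=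
        ih res1 chk1 (ys ++ new1) f hr1 hc1l hrest
      refine ⟨res', chk', new1 ++ new2, ?_, hr', hc', ?_, ?_, ?_, ?_⟩
      · rw [hfe]
        simp only [List.map_cons, List.cons_append, pvRunQ, htget]
        rw [hrun1]
        dsimp only
        have hq : rest.map (fun u => (u, c)) ++ ys.map (fun u => (u, c + 1)) ++
            new1.map (fun v => (v, c + 1)) =
            rest.map (fun u => (u, c)) ++ (ys ++ new1).map (fun u => (u, c + 1)) := by
          simp [List.map_append]
        rw [hq, hrun2]
        simp [List.map_append, List.append_assoc]
      · intro j hj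
        have h1 := hforms1 j hj
        have h2 := hforms2 j hj
        have hcond1 := fun h => (h1.1 h)
        constructor
        · rintro ⟨hnee, hadj⟩
          rcases (hAdjCons j).1 hadj with hhit | hadj'
          · obtain ⟨hcf, hrf⟩ := h1.1 ⟨hnee, hhit⟩
            obtain ⟨hcf2, hrf2⟩ := h2.2 (by rintro ⟨hne2, _⟩; exact hne2 hcf)
            exact ⟨by rw [hcf2, hcf], by rw [hrf2, hrf]⟩
          · by_cases hhit2 : ∃ v ∈ tbl.getD (pvIdx L x) [], pvIdx L v = j
            · obtain ⟨hcf, hrf⟩ := h1.1 ⟨hnee, hhit2⟩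
              obtain ⟨hcf2, hrf2⟩ := h2.2 (by rintro ⟨hne2, _⟩; exact hne2 hcf)
              exact ⟨by rw [hcf2, hcf], by rw [hrf2, hrf]⟩
            · obtain ⟨hcf, hrf⟩ := h1.2 (by rintro ⟨_, hh⟩; exact hhit2 hh)
              obtain ⟨hcf2, hrf2⟩ := h2.1 ⟨by rw [hcf]; exact hnee, hadj'⟩
              exact ⟨hcf2, hrf2⟩
        · intro hn
          have hchk : chk.getD j 0 = 1 ∨
              (¬(∃ v ∈ tbl.getD (pvIdx L x) [], pvIdx L v = j) ∧ ¬ pvAdjFP tbl L rest j) := by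
            by_cases hcc : chk.getD j 0 = 1
            · exact Or.inl hcc
            · refine Or.inr ⟨?_, ?_⟩
              · intro hh; exact hn ⟨hcc, (hAdjCons j).2 (Or.inl hh)⟩
              · intro hh; exact hn ⟨hcc, (hAdjCons j).2 (Or.inr hh)⟩
          rcases hchk with hcc | ⟨hh1, hh2⟩
          · obtain ⟨hcf, hrf⟩ := h1.2 (by rintro ⟨hne1, _⟩; exact hne1 hcc)
            obtain ⟨hcf2, hrf2⟩ := h2.2 (by rintro ⟨hne2, _⟩; rw [hcf] at hne2; exact hne2 hcc)
            exact ⟨by rw [hcf2, hcf], by rw [hrf2, hrf]⟩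
          · obtain ⟨hcf, hrf⟩ := h1.2 (by rintro ⟨_, hh⟩; exact hh1 hh)
            obtain ⟨hcf2, hrf2⟩ := h2.2 (by rintro ⟨_, hh⟩; exact hh2 hh)
            exact ⟨by rw [hcf2, hcf], by rw [hrf2, hrf]⟩
      · intro w hw
        rcases List.mem_append.1 hw with h | h
        · exact hvn1 w h
        · exact hvn2 w h
      · intro j hj
        have him1 := himg1 j hj
        have him2 := himg2 j hj
        have h1 := hforms1 j hj
        constructor
        · rintro ⟨w, hw, hww⟩
          rcases List.mem_append.1 hw with h | h
          · obtain ⟨hnee, hhit⟩ := him1.1 ⟨w, h, hww⟩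
            exact ⟨hnee, (hAdjCons j).2 (Or.inl hhit)⟩
          · obtain ⟨hne2, hadj'⟩ := him2.1 ⟨w, h, hww⟩
            have hnee : chk.getD j 0 ≠ 1 := by
              intro hcc
              obtain ⟨hcf, _⟩ := h1.2 (by rintro ⟨hne1, _⟩; exact hne1 hcc)
              rw [hcf] at hne2
              exact hne2 hcc
            exact ⟨hnee, (hAdjCons j).2 (Or.inr hadj')⟩
        · rintro ⟨hnee, hadj⟩
          by_cases hhit : ∃ v ∈ tbl.getD (pvIdx L x) [], pvIdx L v = j
          · obtain ⟨w, hw, hww⟩ := him1.2 ⟨hnee, hhit⟩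
            exact ⟨w, List.mem_append.2 (Or.inl hw), hww⟩
          · rcases (hAdjCons j).1 hadj with hh | hadj'
            · exact absurd hh hhit
            · obtain ⟨hcf, _⟩ := h1.2 (by rintro ⟨_, hh⟩; exact hhit hh)
              obtain ⟨w, hw, hww⟩ := him2.2 ⟨by rw [hcf]; exact hnee, hadj'⟩
              exact ⟨w, List.mem_append.2 (Or.inr hw), hww⟩
      · simp only [List.length_append]
        omega

-- one direction of B's edge relaxation: the written-slot set W grows by at most the target slot
lemma pvRelaxDirChar (L : Nat) (c : Int) (hc : 0 ≤ c) (dist : List Int) (hdl : dist.length = L)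
    (roads : List (Int × Int))
    (Hval : ∀ i j, i < L → j < L → pvAdjP roads L i j → dist.getD i 0 ≠ -1 →
      dist.getD j 0 = -1 → dist.getD i 0 = c)
    (u v : Int) (hu0 : -(L : Int) ≤ u) (hu1 : u < L) (hv0 : -(L : Int) ≤ v) (hv1 : v < L)
    (huv : pvAdjP roads L (pvIdx L u) (pvIdx L v))
    (nxt : List Int) (changed : Bool) (W : Nat → Prop)
    (hnl : nxt.length = L)
    (hW : ∀ j, W j → j < L ∧ dist.getD j 0 = -1)
    (hWf : ∀ j, j < L → (W j → nxt.getD j 0 = c + 1) ∧ (¬ W j → nxt.getD j 0 = dist.getD j 0))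
    (hch : changed = true ↔ ∃ j, W j) :
    ∃ nxt' changed',
      pvRelaxDir dist u v nxt changed = some (nxt', changed') ∧
      nxt'.length = L ∧
      (∀ j, (W j ∨ (j = pvIdx L v ∧ dist.getD (pvIdx L u) 0 ≠ -1 ∧ dist.getD (pvIdx L v) 0 = -1))
        → j < L ∧ dist.getD j 0 = -1) ∧
      (∀ j, j < L →
        ((W j ∨ (j = pvIdx L v ∧ dist.getD (pvIdx L u) 0 ≠ -1 ∧ dist.getD (pvIdx L v) 0 = -1))
          → nxt'.getD j 0 = c + 1) ∧
        (¬(W j ∨ (j = pvIdx L v ∧ dist.getD (pvIdx L u) 0 ≠ -1 ∧ dist.getD (pvIdx L v) 0 = -1))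
          → nxt'.getD j 0 = dist.getD j 0)) ∧
      (changed' = true ↔ ∃ j, (W j ∨
        (j = pvIdx L v ∧ dist.getD (pvIdx L u) 0 ≠ -1 ∧ dist.getD (pvIdx L v) 0 = -1))) := by
  have hiu : pvIdx L u < L := pvIdx_lt L u hu0 hu1
  have hiv : pvIdx L v < L := pvIdx_lt L v hv0 hv1
  have hgetu : PySem.List.pyGet? dist u = some (dist.getD (pvIdx dist.length u) 0) :=
    pvLookup dist 0 u (by omega) (by omega)
  rw [hdl] at hgetu
  by_cases hdu : dist.getD (pvIdx L u) 0 = -1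
  · -- source slot unvalued: no write
    refine ⟨nxt, changed, ?_, hnl, ?_, ?_, ?_⟩
    · simp only [pvRelaxDir, hgetu]
      rw [if_neg (not_not_intro hdu)]
    · rintro j (hj | ⟨_, hne, _⟩)
      · exact hW j hj
      · exact absurd hdu hne
    · intro j hj
      constructor
      · rintro (hj' | ⟨_, hne, _⟩)
        · exact (hWf j hj).1 hj'
        · exact absurd hdu hne
      · intro hn
        exact (hWf j hj).2 (fun hj' => hn (Or.inl hj'))
    · rw [hch]
      constructor
      · rintro ⟨j, hj⟩; exact ⟨j, Or.inl hj⟩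
      · rintro ⟨j, hj | ⟨_, hne, _⟩⟩
        · exact ⟨j, hj⟩
        · exact absurd hdu hne
  · have hgetv : PySem.List.pyGet? nxt v = some (nxt.getD (pvIdx nxt.length v) 0) :=
      pvLookup nxt 0 v (by omega) (by omega)
    rw [hnl] at hgetv
    by_cases hWv : W (pvIdx L v)
    · -- already written this round: nxt[v] = c+1 ≠ -1, no write
      have hnv : nxt.getD (pvIdx L v) 0 = c + 1 := (hWf _ hiv).1 hWv
      have hdv : dist.getD (pvIdx L v) 0 = -1 := (hW _ hWv).2
      refine ⟨nxt, changed, ?_, hnl, ?_, ?_, ?_⟩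
      · simp only [pvRelaxDir, hgetu]
        rw [if_pos hdu]
        simp only [hgetv]
        rw [hnv, if_neg (by omega : ¬ (c + 1 : Int) = -1)]
      · rintro j (hj | ⟨rfl, _, _⟩)
        · exact hW j hj
        · exact ⟨hiv, hdv⟩
      · intro j hj
        constructor
        · rintro (hj' | ⟨rfl, _, _⟩)
          · exact (hWf j hj).1 hj'
          · exact hnv
        · intro hn
          exact (hWf j hj).2 (fun hj' => hn (Or.inl hj'))
      · rw [hch]
        constructor
        · rintro ⟨j, hj⟩; exact ⟨j, Or.inl hj⟩
        · rintro ⟨j, hj | ⟨rfl, _, _⟩⟩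
          · exact ⟨j, hj⟩
          · exact ⟨pvIdx L v, hWv⟩
    · by_cases hdv : dist.getD (pvIdx L v) 0 = -1
      · -- fresh target: write c+1
        have hnv : nxt.getD (pvIdx L v) 0 = dist.getD (pvIdx L v) 0 := (hWf _ hiv).2 hWv
        have hduc : dist.getD (pvIdx L u) 0 = c := Hval _ _ hiu hiv huv hdu hdv
        have hset : PySem.List.pySet? nxt v (dist.getD (pvIdx L u) 0 + 1)
            = some (nxt.set (pvIdx nxt.length v) (dist.getD (pvIdx L u) 0 + 1)) :=
          pvSetSome nxt _ v (by omega) (by omega)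
        rw [hnl] at hset
        refine ⟨nxt.set (pvIdx L v) (dist.getD (pvIdx L u) 0 + 1), true, ?_, by simpa using hnl,
          ?_, ?_, ?_⟩
        · simp only [pvRelaxDir, hgetu]
          rw [if_pos hdu]
          simp only [hgetv]
          rw [hnv, if_pos hdv]
          simp only [hset]
        · rintro j (hj | ⟨rfl, _, _⟩)
          · exact hW j hj
          · exact ⟨hiv, hdv⟩
        · intro j hj
          have hgs : (nxt.set (pvIdx L v) (dist.getD (pvIdx L u) 0 + 1)).getD j 0
              = if j = pvIdx L v then dist.getD (pvIdx L u) 0 + 1 else nxt.getD j 0 :=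
            pvGetD_set nxt (pvIdx L v) j _ 0 (by omega)
          constructor
          · rintro (hj' | ⟨rfl, _, _⟩)
            · have hjv : j ≠ pvIdx L v := fun h => hWv (h ▸ hj')
              rw [hgs, if_neg hjv]
              exact (hWf j hj).1 hj'
            · rw [hgs, if_pos rfl, hduc]
          · intro hn
            have hjv : j ≠ pvIdx L v := fun h => hn (Or.inr ⟨h, hdu, hdv⟩)
            rw [hgs, if_neg hjv]
            exact (hWf j hj).2 (fun hj' => hn (Or.inl hj'))
        · simp only [true_iff]
          exact ⟨pvIdx L v, Or.inr ⟨rfl, hdu, hdv⟩⟩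
      · -- target already valued in dist: no write
        have hnv : nxt.getD (pvIdx L v) 0 = dist.getD (pvIdx L v) 0 := (hWf _ hiv).2 hWv
        refine ⟨nxt, changed, ?_, hnl, ?_, ?_, ?_⟩
        · simp only [pvRelaxDir, hgetu]
          rw [if_pos hdu]
          simp only [hgetv]
          rw [if_neg (by rw [hnv]; exact hdv)]
        · rintro j (hj | ⟨_, _, hd⟩)
          · exact hW j hj
          · exact absurd hd hdv
        · intro j hj
          constructor
          · rintro (hj' | ⟨_, _, hd⟩)
            · exact (hWf j hj).1 hj'
            · exact absurd hd hdv
          · intro hn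
            exact (hWf j hj).2 (fun hj' => hn (Or.inl hj'))
        · rw [hch]
          constructor
          · rintro ⟨j, hj⟩; exact ⟨j, Or.inl hj⟩
          · rintro ⟨j, hj | ⟨_, _, hd⟩⟩
            · exact ⟨j, hj⟩
            · exact absurd hd hdv

-- one full relaxation round of B over an edge suffix
lemma pvEdgesChar (L : Nat) (c : Int) (hc : 0 ≤ c) (dist : List Int) (hdl : dist.length = L)
    (roads : List (Int × Int))
    (hvr : ∀ p ∈ roads, (-(L : Int) ≤ p.1 ∧ p.1 < L) ∧ (-(L : Int) ≤ p.2 ∧ p.2 < L))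
    (Hval : ∀ i j, i < L → j < L → pvAdjP roads L i j → dist.getD i 0 ≠ -1 →
      dist.getD j 0 = -1 → dist.getD i 0 = c) :
    ∀ (es : List (Int × Int)), (∀ p ∈ es, p ∈ roads) →
    ∀ (nxt : List Int) (changed : Bool) (W : Nat → Prop),
    nxt.length = L →
    (∀ j, W j → j < L ∧ dist.getD j 0 = -1) →
    (∀ j, j < L → (W j → nxt.getD j 0 = c + 1) ∧ (¬ W j → nxt.getD j 0 = dist.getD j 0)) →
    (changed = true ↔ ∃ j, W j) →
    ∃ nxt' changed',
      pvEdges dist es nxt changed = some (nxt', changed') ∧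
      nxt'.length = L ∧
      (∀ j, j < L →
        ((W j ∨ (dist.getD j 0 = -1 ∧ pvVisP dist L es j)) → nxt'.getD j 0 = c + 1) ∧
        (¬(W j ∨ (dist.getD j 0 = -1 ∧ pvVisP dist L es j)) → nxt'.getD j 0 = dist.getD j 0)) ∧
      (changed' = true ↔ ∃ j, j < L ∧ (W j ∨ (dist.getD j 0 = -1 ∧ pvVisP dist L es j))) := by
  intro es
  induction es with
  | nil =>
    intro hsub nxt changed W hnl hW hWf hch
    refine ⟨nxt, changed, rfl, hnl, ?_, ?_⟩
    · intro j hj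
      constructor
      · rintro (hj' | ⟨_, p, hp, _⟩)
        · exact (hWf j hj).1 hj'
        · exact absurd hp (List.not_mem_nil)
      · intro hn
        exact (hWf j hj).2 (fun hj' => hn (Or.inl hj'))
    · rw [hch]
      constructor
      · rintro ⟨j, hj⟩
        exact ⟨j, (hW j hj).1, Or.inl hj⟩
      · rintro ⟨j, _, hj | ⟨_, p, hp, _⟩⟩
        · exact ⟨j, hj⟩
        · exact absurd hp (List.not_mem_nil)
  | cons p rest ih =>
    obtain ⟨a, b⟩ := p
    intro hsub nxt changed W hnl hW hWf hch
    have hmem : (a, b) ∈ roads := hsub (a, b) (List.mem_cons_self)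
    obtain ⟨⟨ha0, ha1⟩, hb0, hb1⟩ := hvr (a, b) hmem
    have hia : pvIdx L a < L := pvIdx_lt L a ha0 ha1
    have hib : pvIdx L b < L := pvIdx_lt L b hb0 hb1
    have hadj1 : pvAdjP roads L (pvIdx L a) (pvIdx L b) := ⟨(a, b), hmem, Or.inl ⟨rfl, rfl⟩⟩
    have hadj2 : pvAdjP roads L (pvIdx L b) (pvIdx L a) := ⟨(a, b), hmem, Or.inr ⟨rfl, rfl⟩⟩
    obtain ⟨nxt1, ch1, hd1, hnl1, hW1, hWf1, hch1⟩ :=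
      pvRelaxDirChar L c hc dist hdl roads Hval a b ha0 ha1 hb0 hb1 hadj1 nxt changed W
        hnl hW hWf hch
    obtain ⟨nxt2, ch2, hd2, hnl2, hW2, hWf2, hch2⟩ :=
      pvRelaxDirChar L c hc dist hdl roads Hval b a hb0 hb1 ha0 ha1 hadj2 nxt1 ch1 _
        hnl1 hW1 hWf1 hch1
    obtain ⟨nxt', changed', hd3, hnl', hforms, hch'⟩ :=
      ih (fun q hq => hsub q (List.mem_cons_of_mem _ hq)) nxt2 ch2 _ hnl2 hW2 hWf2 hch2
    -- pointwise: the two-direction W-extension plus VisP rest = W plus VisP ((a,b)::rest)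
    have hpt : ∀ j, j < L →
        ((((W j ∨ (j = pvIdx L b ∧ dist.getD (pvIdx L a) 0 ≠ -1 ∧ dist.getD (pvIdx L b) 0 = -1)) ∨
          (j = pvIdx L a ∧ dist.getD (pvIdx L b) 0 ≠ -1 ∧ dist.getD (pvIdx L a) 0 = -1)) ∨
         (dist.getD j 0 = -1 ∧ pvVisP dist L rest j)) ↔
        (W j ∨ (dist.getD j 0 = -1 ∧ pvVisP dist L ((a, b) :: rest) j))) := by
      intro j hj
      constructor
      · rintro (((hj' | ⟨rfl, hne, hd⟩) | ⟨rfl, hne, hd⟩) | ⟨hd, hvis⟩)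
        · exact Or.inl hj'
        · exact Or.inr ⟨hd, (a, b), List.mem_cons_self, Or.inl ⟨rfl, hne⟩⟩
        · exact Or.inr ⟨hd, (a, b), List.mem_cons_self, Or.inr ⟨rfl, hne⟩⟩
        · obtain ⟨q, hq, hdir⟩ := hvis
          exact Or.inr ⟨hd, q, List.mem_cons_of_mem _ hq, hdir⟩
      · rintro (hj' | ⟨hd, q, hq, hdir⟩)
        · exact Or.inl (Or.inl (Or.inl hj'))
        · rcases List.mem_cons.1 hq with rfl | hq'
          · rcases hdir with ⟨hjb, hne⟩ | ⟨hja, hne⟩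
            · exact Or.inl (Or.inl (Or.inr ⟨hjb.symm, hne, by rw [hjb]; exact hd⟩))
            · exact Or.inl (Or.inr ⟨hja.symm, hne, by rw [hja]; exact hd⟩)
          · exact Or.inr ⟨hd, q, hq', hdir⟩
    refine ⟨nxt', changed', ?_, hnl', ?_, ?_⟩
    · simp only [pvEdges, hd1, hd2]
      exact hd3
    · intro j hj
      have h := hforms j hj
      constructor
      · intro hcnd
        exact h.1 (by rw [← hpt j hj] at hcnd; tauto)
      · intro hcnd
        refine h.2 ?_
        rw [← hpt j hj] at hcnd
        tauto
    · rw [hch']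
      constructor
      · rintro ⟨j, hjL, hcnd⟩
        exact ⟨j, hjL, (hpt j hjL).1 (by tauto)⟩
      · rintro ⟨j, hjL, hcnd⟩
        refine ⟨j, hjL, ?_⟩
        have := (hpt j hjL).2 hcnd
        tauto

lemma pvRunQ_nil (tbl : List (List Int)) (f : Nat) (res chk : List Int) :
    pvRunQ tbl f res chk [] = some (res, chk) := by
  cases f <;> rfl

-- under the BFS invariant, B's per-round condition coincides with A's per-level condition
lemma pvBridge (L : Nat) (tbl : List (List Int)) (roads : List (Int × Int))
    (F res chk : List Int) (c : Int)
    (hchar : ∀ i, i < L → ∀ j, ((∃ v ∈ tbl.getD i [], pvIdx L v = j) ↔ pvAdjP roads L i j))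
    (hvr : ∀ p ∈ roads, (-(L : Int) ≤ p.1 ∧ p.1 < L) ∧ (-(L : Int) ≤ p.2 ∧ p.2 < L))
    (hii : ∀ j, j < L → (chk.getD j 0 = 1 ↔ res.getD j 0 ≠ -1))
    (hF : ∀ u ∈ F, ((-(L : Int) ≤ u ∧ u < L) ∧ res.getD (pvIdx L u) 0 = c))
    (hiv : ∀ i j, i < L → j < L → pvAdjP roads L i j → res.getD i 0 ≠ -1 →
      res.getD j 0 = -1 → ∃ u ∈ F, pvIdx L u = i)
    (hc : 0 ≤ c) :
    ∀ j, j < L →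
      ((res.getD j 0 = -1 ∧ pvVisP res L roads j) ↔ (chk.getD j 0 ≠ 1 ∧ pvAdjFP tbl L F j)) := by
  intro j hj
  constructor
  · rintro ⟨hdj, p, hp, hdir⟩
    have hne : chk.getD j 0 ≠ 1 := fun h => (hii j hj).1 h hdj
    obtain ⟨⟨hp10, hp11⟩, hp20, hp21⟩ := hvr p hp
    rcases hdir with ⟨hj2, hvis⟩ | ⟨hj1, hvis⟩
    · have hadj : pvAdjP roads L (pvIdx L p.1) j := ⟨p, hp, Or.inl ⟨rfl, hj2⟩⟩
      obtain ⟨u, hu, hui⟩ := hiv _ j (pvIdx_lt L p.1 hp10 hp11) hj hadj hvis hdj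
      refine ⟨hne, u, hu, ?_⟩
      rw [hui]
      exact (hchar _ (pvIdx_lt L p.1 hp10 hp11) j).2 hadj
    · have hadj : pvAdjP roads L (pvIdx L p.2) j := ⟨p, hp, Or.inr ⟨rfl, hj1⟩⟩
      obtain ⟨u, hu, hui⟩ := hiv _ j (pvIdx_lt L p.2 hp20 hp21) hj hadj hvis hdj
      refine ⟨hne, u, hu, ?_⟩
      rw [hui]
      exact (hchar _ (pvIdx_lt L p.2 hp20 hp21) j).2 hadj
  · rintro ⟨hne, u, hu, hv⟩
    obtain ⟨⟨hu0, hu1⟩, hru⟩ := hF u hu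
    have hiu : pvIdx L u < L := pvIdx_lt L u hu0 hu1
    have hdj : res.getD j 0 = -1 := by
      by_contra hh
      exact hne ((hii j hj).2 hh)
    have hrune : res.getD (pvIdx L u) 0 ≠ -1 := by rw [hru]; omega
    have hadj : pvAdjP roads L (pvIdx L u) j := (hchar _ hiu j).1 hv
    obtain ⟨p, hp, hdir⟩ := hadj
    rcases hdir with ⟨h1, h2⟩ | ⟨h1, h2⟩
    · exact ⟨hdj, p, hp, Or.inl ⟨h2, by rw [h1]; exact hrune⟩⟩
    · exact ⟨hdj, p, hp, Or.inr ⟨h2, by rw [h1]; exact hrune⟩⟩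

-- the main simulation: A's queue BFS and B's relaxation rounds end in the same distance array
lemma pvMainLoop (L : Nat) (tbl : List (List Int)) (roads : List (Int × Int))
    (htlen : tbl.length = L) (htent : ∀ l ∈ tbl, ∀ v ∈ l, -(L : Int) ≤ v ∧ v < L)
    (hvr : ∀ p ∈ roads, (-(L : Int) ≤ p.1 ∧ p.1 < L) ∧ (-(L : Int) ≤ p.2 ∧ p.2 < L))
    (hchar : ∀ i, i < L → ∀ j, ((∃ v ∈ tbl.getD i [], pvIdx L v = j) ↔ pvAdjP roads L i j)) :
    ∀ (fB fA : Nat) (res chk F : List Int) (c : Int),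
    res.length = L → chk.length = L →
    (∀ j, j < L → (chk.getD j 0 = 1 ↔ res.getD j 0 ≠ -1)) →
    (∀ u ∈ F, ((-(L : Int) ≤ u ∧ u < L) ∧ res.getD (pvIdx L u) 0 = c)) →
    (∀ i j, i < L → j < L → pvAdjP roads L i j → res.getD i 0 ≠ -1 → res.getD j 0 = -1 →
      ∃ u ∈ F, pvIdx L u = i) →
    0 ≤ c →
    pvZeros chk + F.length ≤ fA → pvZeros chk + 1 ≤ fB →
    ∃ resf chkf,
      pvRunQ tbl fA res chk (F.map (fun u => (u, c))) = some (resf, chkf) ∧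
      pvWhile roads fB res = some resf := by
  intro fB
  induction fB with
  | zero =>
    intro fA res chk F c _ _ _ _ _ _ _ hfB
    omega
  | succ fb ih =>
    intro fA res chk F c hr hc hii hF hiv hc0 hfA hfB
    have hbr := pvBridge L tbl roads F res chk c hchar hvr hii hF hiv hc0
    have Hval : ∀ i j, i < L → j < L → pvAdjP roads L i j → res.getD i 0 ≠ -1 →
        res.getD j 0 = -1 → res.getD i 0 = c := by
      intro i j hi hj hadj hri hrj
      obtain ⟨u, hu, hui⟩ := hiv i j hi hj hadj hri hrj
      rw [← hui]
      exact (hF u hu).2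
    obtain ⟨nxt', changed', hpe, hnl', hformsB, hchB⟩ :=
      pvEdgesChar L c hc0 res hr roads hvr Hval roads (fun q hq => hq) res false
        (fun _ => False) hr (fun j hj => hj.elim)
        (fun j hj => ⟨fun hj' => hj'.elim, fun _ => rfl⟩) (by simp)
    have hFv : ∀ u ∈ F, -(L : Int) ≤ u ∧ u < L := fun u hu => (hF u hu).1
    obtain ⟨res', chk', new, hrunEq, hr', hc', hformsA, hvn, himg, hz⟩ :=
      pvQLevelChar L tbl htlen htent c F res chk [] (fA - F.length) hr hc hFv
    rw [List.nil_append] at hrunEq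
    simp only [List.map_nil, List.append_nil] at hrunEq
    have hfa : fA - F.length + F.length = fA := by omega
    rw [hfa] at hrunEq
    -- B's next array equals A's post-level result array
    have hEq : nxt' = res' := by
      apply List.ext_getElem (by omega)
      intro k hk1 hk2
      have hkL : k < L := by omega
      rw [← pvGetD_lt nxt' k 0 hk1, ← pvGetD_lt res' k 0 hk2]
      by_cases hcnd : chk.getD k 0 ≠ 1 ∧ pvAdjFP tbl L F k
      · rw [((hformsA k hkL).1 hcnd).2]
        exact (hformsB k hkL).1 (Or.inr ((hbr k hkL).2 hcnd))
      · rw [((hformsA k hkL).2 hcnd).2]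
        refine (hformsB k hkL).2 ?_
        rintro (hf | hvis)
        · exact hf
        · exact hcnd ((hbr k hkL).1 hvis)
    have hchd : changed' = true ↔ new ≠ [] := by
      rw [hchB]
      constructor
      · rintro ⟨j, hjL, hf | hvis⟩
        · exact hf.elim
        · obtain ⟨w, hw, _⟩ := (himg j hjL).2 ((hbr j hjL).1 hvis)
          exact List.ne_nil_of_mem hw
      · intro hne
        obtain ⟨w, hw⟩ := List.exists_mem_of_ne_nil new hne
        obtain ⟨hw0, hw1⟩ := hvn w hw
        have hjL : pvIdx L w < L := pvIdx_lt L w hw0 hw1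
        exact ⟨pvIdx L w, hjL, Or.inr ((hbr _ hjL).2 ((himg _ hjL).1 ⟨w, hw, rfl⟩))⟩
    by_cases hnew : new = []
    · have hch0 : changed' = false := by
        rcases changed' with _ | _
        · rfl
        · exact absurd (hchd.1 rfl) (by simp [hnew])
      refine ⟨res', chk', ?_, ?_⟩
      · rw [hnew] at hrunEq
        simp only [List.map_nil] at hrunEq
        rw [hrunEq]
        exact pvRunQ_nil tbl _ res' chk'
      · simp only [pvWhile, hpe, hch0, Bool.false_eq_true, if_false]
        rw [hEq]
    · have hch1 : changed' = true := hchd.2 hnew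
      have hii' : ∀ j, j < L → (chk'.getD j 0 = 1 ↔ res'.getD j 0 ≠ -1) := by
        intro j hj
        by_cases hcnd : chk.getD j 0 ≠ 1 ∧ pvAdjFP tbl L F j
        · obtain ⟨h1, h2⟩ := (hformsA j hj).1 hcnd
          rw [h1, h2]
          constructor
          · intro _; omega
          · intro _; rfl
        · obtain ⟨h1, h2⟩ := (hformsA j hj).2 hcnd
          rw [h1, h2]
          exact hii j hj
      have hF' : ∀ u ∈ new, ((-(L : Int) ≤ u ∧ u < L) ∧ res'.getD (pvIdx L u) 0 = c + 1) := by
        intro u hu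
        obtain ⟨hu0, hu1⟩ := hvn u hu
        have hjL : pvIdx L u < L := pvIdx_lt L u hu0 hu1
        have hcnd := (himg _ hjL).1 ⟨u, hu, rfl⟩
        exact ⟨⟨hu0, hu1⟩, ((hformsA _ hjL).1 hcnd).2⟩
      have hiv' : ∀ i j, i < L → j < L → pvAdjP roads L i j → res'.getD i 0 ≠ -1 →
          res'.getD j 0 = -1 → ∃ u ∈ new, pvIdx L u = i := by
        intro i j hi hj hadj hri hrj
        by_cases ci : chk.getD i 0 ≠ 1 ∧ pvAdjFP tbl L F i
        · exact (himg i hi).2 ci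
        · have hresi : res'.getD i 0 = res.getD i 0 := ((hformsA i hi).2 ci).2
          by_cases cj : chk.getD j 0 ≠ 1 ∧ pvAdjFP tbl L F j
          · have : res'.getD j 0 = c + 1 := ((hformsA j hj).1 cj).2
            omega
          · have hresj : res'.getD j 0 = res.getD j 0 := ((hformsA j hj).2 cj).2
            obtain ⟨u, hu, hui⟩ := hiv i j hi hj hadj (by rw [← hresi]; exact hri)
              (by rw [← hresj]; exact hrj)
            exfalso
            apply cj
            refine ⟨?_, u, hu, ?_⟩
            · intro hcc
              exact ((hii j hj).1 hcc) (by rw [← hresj]; exact hrj)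
            · rw [hui]
              exact (hchar i hi j).2 hadj
      have hlen1 : 1 ≤ new.length := by
        rcases new with _ | _
        · exact absurd rfl hnew
        · simp
      obtain ⟨resf, chkf, hA2, hB2⟩ :=
        ih (fA - F.length) res' chk' new (c + 1) hr' hc' hii' hF' hiv' (by omega)
          (by omega) (by omega)
      refine ⟨resf, chkf, ?_, ?_⟩
      · rw [hrunEq]
        exact hA2
      · simp only [pvWhile, hpe, hch1, if_pos]
        rw [hEq]
        exact hB2

-- reading the comprehension [f(i) for i in range(n+1)] at a valid slot
lemma pvInitGetD {α : Type} [Inhabited α] (m : Int) (f : Int → α) (d : α) (j : Nat)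
    (hj : (j : Int) < m) :
    ((PySem.List.pyRange 0 m 1).map f).getD j d = f (j : Int) := by
  have hlen : ((PySem.List.pyRange 0 m 1).map f).length = (m - 0).toNat := by
    simp [PySem.List.length_pyRange_one]
  have hjl : j < ((PySem.List.pyRange 0 m 1).map f).length := by
    rw [hlen]; omega
  rw [pvGetD_lt _ j d hjl, List.getElem_map]
  rw [PySem.List.getElem_pyRange_one]
  simp

lemma pvInitLen {α : Type} (m : Int) (f : Int → α) (hm : 0 ≤ m) :
    ((PySem.List.pyRange 0 m 1).map f).length = m.toNat := by
  simp [PySem.List.length_pyRange_one]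

-- both ports return [] when sources = []
lemma pvSolNil (n : Int) (roads : List (Int × Int)) (destination : Int) :
    solution n roads [] destination = [] := by
  simp only [solution]
  rcases hb : pvBuildTable roads ((PySem.List.pyRange 0 (n + 1) 1).map
      (fun _ => ([] : List Int))) with _ | tbl
  · rfl
  · rcases hr : pvRunQ tbl ((n + 1).toNat + 1)
        ((PySem.List.pyRange 0 (n + 1) 1).map (fun i => if i = destination then (0 : Int) else -1))
        ((PySem.List.pyRange 0 (n + 1) 1).map (fun i => if i = destination then (1 : Int) else 0))
        [(destination, 0)] with _ | p
    · simp [hr]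
    · obtain ⟨res, chk⟩ := p
      simp [hr, pvReadout]

lemma pvAltNil (n : Int) (roads : List (Int × Int)) (destination : Int) :
    solution_alt n roads [] destination = [] := by
  simp only [solution_alt]
  rcases hw : pvWhile roads ((n + 1).toNat + 2)
      ((PySem.List.pyRange 0 (n + 1) 1).map (fun i => if i = destination then (0 : Int) else -1))
      with _ | dist
  · rfl
  · simp [pvReadoutB]

-- ===== VERDICT (by name: the statements are the Claim_ definitions above) =====
theorem solution_spec : Claim_unchanged_solution := by
  unfold Claim_unchanged_solution
  intro n roads sources destination hdom hpre
  unfold Spec_solution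
  intro hnd
  obtain ⟨hn, ⟨hd0, hd1⟩, hroads, hsrc⟩ := hpre
  have hL : (((n + 1).toNat : Int)) = n + 1 := by omega
  by_cases hd : 0 ≤ destination
  · -- the main case: destination is a genuine slot
    have hvrL : ∀ p ∈ roads,
        (-(((n + 1).toNat : Int)) ≤ p.1 ∧ p.1 < ((n + 1).toNat : Int)) ∧
        (-(((n + 1).toNat : Int)) ≤ p.2 ∧ p.2 < ((n + 1).toNat : Int)) := by
      intro p hp
      obtain ⟨⟨h1, h2⟩, h3, h4⟩ := hroads p hp
      omega
    have htbl0len : ((PySem.List.pyRange 0 (n + 1) 1).map (fun _ => ([] : List Int))).length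
        = (n + 1).toNat := pvInitLen (n + 1) _ (by omega)
    have htbl0ent : ∀ l ∈ (PySem.List.pyRange 0 (n + 1) 1).map (fun _ => ([] : List Int)),
        ∀ v ∈ l, -(n + 1) ≤ v ∧ v ≤ n := by
      intro l hl v hv
      obtain ⟨_, _, h⟩ := List.mem_map.1 hl
      subst h
      simp at hv
    obtain ⟨tbl, hbuild, htlen, htent⟩ :=
      pvBuild n hn roads ((PySem.List.pyRange 0 (n + 1) 1).map (fun _ => ([] : List Int)))
        htbl0len htbl0ent hroads
    have htentL : ∀ l ∈ tbl, ∀ v ∈ l,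
        -(((n + 1).toNat : Int)) ≤ v ∧ v < ((n + 1).toNat : Int) := by
      intro l hl v hv
      obtain ⟨h1, h2⟩ := htent l hl v hv
      omega
    have htbl0get : ∀ i, i < (n + 1).toNat →
        ((PySem.List.pyRange 0 (n + 1) 1).map (fun _ => ([] : List Int))).getD i [] = [] := by
      intro i hi
      have : ((i : Int)) < n + 1 := by omega
      exact pvInitGetD (n + 1) _ [] i this
    have hchar : ∀ i, i < (n + 1).toNat → ∀ j,
        ((∃ v ∈ tbl.getD i [], pvIdx (n + 1).toNat v = j) ↔ pvAdjP roads (n + 1).toNat i j) := by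
      intro i hi j
      rw [pvTblChar (n + 1).toNat roads _ tbl hbuild htbl0len hvrL i hi j, htbl0get i hi]
      simp
    have hreslen : ((PySem.List.pyRange 0 (n + 1) 1).map
        (fun i => if i = destination then (0 : Int) else -1)).length = (n + 1).toNat :=
      pvInitLen (n + 1) _ (by omega)
    have hchklen : ((PySem.List.pyRange 0 (n + 1) 1).map
        (fun i => if i = destination then (1 : Int) else 0)).length = (n + 1).toNat :=
      pvInitLen (n + 1) _ (by omega)
    have hresget : ∀ j, j < (n + 1).toNat →
        ((PySem.List.pyRange 0 (n + 1) 1).map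
          (fun i => if i = destination then (0 : Int) else -1)).getD j 0
        = if (j : Int) = destination then (0 : Int) else -1 := by
      intro j hj
      exact pvInitGetD (n + 1) _ 0 j (by omega)
    have hchkget : ∀ j, j < (n + 1).toNat →
        ((PySem.List.pyRange 0 (n + 1) 1).map
          (fun i => if i = destination then (1 : Int) else 0)).getD j 0
        = if (j : Int) = destination then (1 : Int) else 0 := by
      intro j hj
      exact pvInitGetD (n + 1) _ 0 j (by omega)
    have hii0 : ∀ j, j < (n + 1).toNat →
        (((PySem.List.pyRange 0 (n + 1) 1).map
            (fun i => if i = destination then (1 : Int) else 0)).getD j 0 = 1 ↔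
         ((PySem.List.pyRange 0 (n + 1) 1).map
            (fun i => if i = destination then (0 : Int) else -1)).getD j 0 ≠ -1) := by
      intro j hj
      rw [hresget j hj, hchkget j hj]
      by_cases h : (j : Int) = destination <;> simp [h]
    have hidxd : pvIdx (n + 1).toNat destination = destination.toNat := by
      unfold pvIdx
      rw [if_pos hd]
    have hdlt : destination.toNat < (n + 1).toNat := by omega
    have hF0 : ∀ u ∈ [destination],
        ((-(((n + 1).toNat : Int)) ≤ u ∧ u < ((n + 1).toNat : Int)) ∧
         ((PySem.List.pyRange 0 (n + 1) 1).map
            (fun i => if i = destination then (0 : Int) else -1)).getD (pvIdx (n + 1).toNat u) 0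
           = 0) := by
      intro u hu
      rw [List.mem_singleton] at hu
      subst hu
      refine ⟨⟨by omega, by omega⟩, ?_⟩
      rw [hidxd, hresget _ hdlt]
      rw [if_pos (by omega)]
    have hiv0 : ∀ i j, i < (n + 1).toNat → j < (n + 1).toNat →
        pvAdjP roads (n + 1).toNat i j →
        ((PySem.List.pyRange 0 (n + 1) 1).map
          (fun i => if i = destination then (0 : Int) else -1)).getD i 0 ≠ -1 →
        ((PySem.List.pyRange 0 (n + 1) 1).map
          (fun i => if i = destination then (0 : Int) else -1)).getD j 0 = -1 →
        ∃ u ∈ [destination], pvIdx (n + 1).toNat u = i := by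
      intro i j hi hj _ hri _
      rw [hresget i hi] at hri
      have : (i : Int) = destination := by
        by_contra h
        rw [if_neg h] at hri
        exact hri rfl
      refine ⟨destination, List.mem_singleton_self _, ?_⟩
      rw [hidxd]
      omega
    have hzb : pvZeros ((PySem.List.pyRange 0 (n + 1) 1).map
        (fun i => if i = destination then (1 : Int) else 0)) ≤ (n + 1).toNat := by
      unfold pvZeros
      calc _ ≤ ((PySem.List.pyRange 0 (n + 1) 1).map
          (fun i => if i = destination then (1 : Int) else 0)).length := List.countP_le_length
        _ = (n + 1).toNat := hchklen
    obtain ⟨resf, chkf, hA, hB⟩ :=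
      pvMainLoop (n + 1).toNat tbl roads htlen htentL hvrL hchar
        ((n + 1).toNat + 2) ((n + 1).toNat + 1)
        ((PySem.List.pyRange 0 (n + 1) 1).map (fun i => if i = destination then (0 : Int) else -1))
        ((PySem.List.pyRange 0 (n + 1) 1).map (fun i => if i = destination then (1 : Int) else 0))
        [destination] 0 hreslen hchklen hii0 hF0 hiv0 (by omega)
        (by simp only [List.length_cons, List.length_nil]; omega) (by omega)
    simp only [List.map_cons, List.map_nil] at hA
    simp only [solution, solution_alt]
    rw [hbuild]
    dsimp only
    rw [hA, hB]
    dsimp only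
    rw [pvReadoutSame]
  · -- destination < 0: by ¬D_, roads or sources is empty
    have hcase : roads = [] ∨ sources = [] := by
      by_contra hcc
      push_neg at hcc
      exact hnd ⟨by omega, hcc.1, hcc.2⟩
    rcases hcase with hro | hso
    · -- no roads: both sides return the untouched init array readout
      subst hro
      have htbl0len : ((PySem.List.pyRange 0 (n + 1) 1).map (fun _ => ([] : List Int))).length
          = (n + 1).toNat := pvInitLen (n + 1) _ (by omega)
      have hget : PySem.List.pyGet?
          ((PySem.List.pyRange 0 (n + 1) 1).map (fun _ => ([] : List Int))) destination
          = some (((PySem.List.pyRange 0 (n + 1) 1).map (fun _ => ([] : List Int))).getD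
              (pvIdx ((PySem.List.pyRange 0 (n + 1) 1).map (fun _ => ([] : List Int))).length
                destination) []) :=
        pvLookup _ [] destination (by rw [htbl0len]; omega) (by rw [htbl0len]; omega)
      have hgete : ((PySem.List.pyRange 0 (n + 1) 1).map (fun _ => ([] : List Int))).getD
          (pvIdx ((PySem.List.pyRange 0 (n + 1) 1).map (fun _ => ([] : List Int))).length
            destination) [] = [] := by
        apply pvInitGetD (n + 1) (fun _ => ([] : List Int)) []
        have := pvIdx_lt ((PySem.List.pyRange 0 (n + 1) 1).map
            (fun _ => ([] : List Int))).length destination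
            (by rw [htbl0len]; omega) (by rw [htbl0len]; omega)
        omega
      rw [hgete] at hget
      simp only [solution, solution_alt]
      have hbuild : pvBuildTable []
          ((PySem.List.pyRange 0 (n + 1) 1).map (fun _ => ([] : List Int)))
          = some ((PySem.List.pyRange 0 (n + 1) 1).map (fun _ => ([] : List Int))) := rfl
      rw [hbuild]
      dsimp only
      have hrun : pvRunQ ((PySem.List.pyRange 0 (n + 1) 1).map (fun _ => ([] : List Int)))
          ((n + 1).toNat + 1)
          ((PySem.List.pyRange 0 (n + 1) 1).map
            (fun i => if i = destination then (0 : Int) else -1))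
          ((PySem.List.pyRange 0 (n + 1) 1).map
            (fun i => if i = destination then (1 : Int) else 0))
          [(destination, 0)] = some
          (((PySem.List.pyRange 0 (n + 1) 1).map
            (fun i => if i = destination then (0 : Int) else -1)),
           ((PySem.List.pyRange 0 (n + 1) 1).map
            (fun i => if i = destination then (1 : Int) else 0))) := by
        simp only [pvRunQ, hget, pvForNbrs]
      rw [hrun]
      dsimp only
      have hwhile : pvWhile [] ((n + 1).toNat + 2)
          ((PySem.List.pyRange 0 (n + 1) 1).map
            (fun i => if i = destination then (0 : Int) else -1)) = some
          ((PySem.List.pyRange 0 (n + 1) 1).map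
            (fun i => if i = destination then (0 : Int) else -1)) := by
        simp [pvWhile, pvEdges]
      rw [hwhile]
      dsimp only
      rw [pvReadoutSame]
    · subst hso
      rw [pvSolNil, pvAltNil]

theorem solution_changed : Claim_changed_solution := by
  unfold Claim_changed_solution
  decide
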